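-- pv_equiv track=rewrite | github.com/weihe13/Lee_code | Amazon/amazon.py | minKeyboardClick
-- ===== SOURCE A (Python) =====
-- import collections
--
-- def minKeyboardClick(string):
--     string = list(string)
--     answer = 0
--     count = list(collections.Counter(string).keys())
--     for i in range(len(string)):
--         if 0 <= count.index(string[i]) < 9:
--             answer += 1
--         elif 9 <=  count.index(string[i]) < 18:
--             answer += 2
--         elif 18 <=  count.index(string[i]) < 27:
--             answer += 3
--
--     return answer
-- ===== SOURCE B (Python) =====
-- import collections
--
-- def minKeyboardClick(string):
--     answer = 0
--     for rank, (char, freq) in enumerate(collections.Counter(string).items()):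
--         if rank < 9:
--             weight = 1
--         elif rank < 18:
--             weight = 2
--         elif rank < 27:
--             weight = 3
--         else:
--             weight = 0
--         answer += freq * weight
--     return answer
-- ===== Notes on version B (the rewrite author's own statement) =====
-- stated objective: faster
-- what changed: B builds Counter(string) once and sums freq*bucket-weight over its 26-at-most-relevant distinct entries, instead of A's per-position loop that recomputes count.index(char) (a linear scan) for every character.
import Mathlib
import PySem

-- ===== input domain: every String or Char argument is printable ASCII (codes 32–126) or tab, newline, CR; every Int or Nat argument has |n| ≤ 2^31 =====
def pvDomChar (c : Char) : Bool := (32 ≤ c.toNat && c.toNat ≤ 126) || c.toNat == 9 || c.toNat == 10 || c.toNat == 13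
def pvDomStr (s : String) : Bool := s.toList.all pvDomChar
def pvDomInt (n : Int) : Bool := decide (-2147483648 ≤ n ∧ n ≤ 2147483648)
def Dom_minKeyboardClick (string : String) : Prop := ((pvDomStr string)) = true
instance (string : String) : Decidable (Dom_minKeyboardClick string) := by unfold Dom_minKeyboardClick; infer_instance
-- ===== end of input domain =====

-- B aggregates clicks per distinct character (Counter entry) weighted by frequency, instead of A's per-position rescan; return values proved equal on all of Dom.

-- ===== PORT A =====
-- 'count.index(string[i])' never raises in A (string[i] is always a Counter key), so the
-- port reads the always-some index? through '.getD 0'.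
def minKeyboardClick (string : String) : Int :=
  let s := string.toList
  let count := (PySem.Dict.counter s).keys
  (PySem.List.pyRange 0 s.length 1).foldl (fun answer i =>
    let idx : Nat := (PySem.List.index? count (PySem.List.pyGetD s i ' ')).getD 0
    if 0 ≤ idx ∧ idx < 9 then answer + 1
    else if 9 ≤ idx ∧ idx < 18 then answer + 2
    else if 18 ≤ idx ∧ idx < 27 then answer + 3
    else answer) 0

-- ===== PORT B =====
def pvWeight (rank : Int) : Int :=
  if rank < 9 then 1 else if rank < 18 then 2 else if rank < 27 then 3 else 0

def minKeyboardClick_alt (string : String) : Int :=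
  (PySem.List.enumerate (PySem.Dict.counter string.toList).items 0).foldl
    (fun answer p => answer + p.2.2 * pvWeight p.1) 0

-- ===== PRECONDITION & SPEC =====
def Spec_minKeyboardClick (string : String) (out : Int) : Prop := out = minKeyboardClick_alt string
instance (string : String) (out : Int) : Decidable (Spec_minKeyboardClick string out) := by unfold Spec_minKeyboardClick; infer_instance

-- ===== CLAIM (what is proved, stated in full; the proofs are below) =====
def Claim_equal_minKeyboardClick : Prop := ∀ (string : String), Dom_minKeyboardClick string → Spec_minKeyboardClick string (minKeyboardClick string)

-- ===== LEMMAS AND PROOFS =====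

-- A's per-character contribution: the bucket weight of the character's first-appearance rank in d.
def pvRankWeight (d : List Char) (c : Char) : Int :=
  pvWeight (((PySem.List.index? d c).getD 0 : Nat) : Int)

lemma index?_getElem_of_nodup {α : Type} [BEq α] [LawfulBEq α] :
    ∀ (d : List α), d.Nodup → ∀ (i : Nat) (h : i < d.length),
    PySem.List.index? d d[i] = some i := by
  intro d
  induction d with
  | nil => intro _ i h; simp at h
  | cons x t ih =>
    intro hd i h
    cases i with
    | zero => exact PySem.List.index?_cons_self x t
    | succ j =>
      have hj : j < t.length := by simpa using h
      have hx : x ≠ t[j] := by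
        intro he
        exact (List.nodup_cons.mp hd).1 (he ▸ List.getElem_mem hj)
      rw [List.getElem_cons_succ, PySem.List.index?_cons_of_ne _ hx,
          ih (List.nodup_cons.mp hd).2 j hj]
      rfl

-- Σ over a nodup list of an indicator at x ∈ d picks out f x.
lemma sum_map_ite_eq {α : Type} [DecidableEq α] (f : α → Int) (x : α) :
    ∀ (d : List α), d.Nodup → x ∈ d →
    (d.map (fun k => if k = x then f k else 0)).sum = f x := by
  intro d
  induction d with
  | nil => intro _ h; simp at h
  | cons y t ih =>
    intro hnd hm
    rcases List.mem_cons.mp hm with h | h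
    · subst h
      have hz : (t.map (fun k => if k = x then f k else 0)).sum = 0 := by
        apply List.sum_eq_zero
        intro z hz
        rcases List.mem_map.mp hz with ⟨k, hk, hkz⟩
        have hky : k ≠ x := fun he => (List.nodup_cons.mp hnd).1 (he ▸ hk)
        simp [hky] at hkz
        omega
      simp [hz]
    · have hyx : y ≠ x := fun he => (List.nodup_cons.mp hnd).1 (he ▸ h)
      simp [hyx, ih (List.nodup_cons.mp hnd).2 h]

-- Grouping: a sum over all elements of l equals the count-weighted sum over any nodup cover d.
lemma group_sum {α : Type} [DecidableEq α] (f : α → Int) :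
    ∀ (l d : List α), d.Nodup → (∀ x ∈ l, x ∈ d) →
    (l.map f).sum = (d.map (fun k => ((l.count k : Int)) * f k)).sum := by
  intro l
  induction l with
  | nil =>
    intro d _ _
    simp
  | cons x t ih =>
    intro d hnd hsub
    have hx : x ∈ d := hsub x (List.mem_cons_self)
    have ht : ∀ y ∈ t, y ∈ d := fun y hy => hsub y (List.mem_cons_of_mem _ hy)
    have hcnt : ∀ k, (((x :: t).count k : Int)) * f k
        = ((t.count k : Int)) * f k + (if k = x then f k else 0) := by
      intro k
      by_cases hk : k = x
      · subst hk; simp; ring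
      · have hxk : ¬ (x = k) := fun he => hk he.symm
        simp [hk, hxk]
    calc ((x :: t).map f).sum
        = f x + (t.map f).sum := by simp
      _ = f x + (d.map (fun k => ((t.count k : Int)) * f k)).sum := by
          rw [ih d hnd ht]
      _ = (d.map (fun k => ((t.count k : Int)) * f k)).sum
          + (d.map (fun k => if k = x then f k else 0)).sum := by
          rw [sum_map_ite_eq f x d hnd hx]; ring
      _ = (d.map (fun k => (((x :: t).count k : Int)) * f k)).sum := by
          rw [← PySem.List.sum_map_add_int]
          exact congrArg List.sum (List.map_congr_left (fun k _ => (hcnt k).symm))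

-- A as a weight-sum over the characters of s.
lemma portA_eq_sum (s : List Char) :
    (PySem.List.pyRange 0 s.length 1).foldl (fun answer i =>
      let idx : Nat := (PySem.List.index? (PySem.Set.ofList s) (PySem.List.pyGetD s i ' ')).getD 0
      if 0 ≤ idx ∧ idx < 9 then answer + 1
      else if 9 ≤ idx ∧ idx < 18 then answer + 2
      else if 18 ≤ idx ∧ idx < 27 then answer + 3
      else answer) 0
    = (s.map (pvRankWeight (PySem.Set.ofList s))).sum := by
  rw [PySem.List.foldl_congr_mem (g := fun answer i =>
      answer + pvRankWeight (PySem.Set.ofList s) (PySem.List.pyGetD s i ' '))]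
  · rw [PySem.List.foldl_add,
        show (fun i => pvRankWeight (PySem.Set.ofList s) (PySem.List.pyGetD s i ' '))
          = (pvRankWeight (PySem.Set.ofList s)) ∘ (fun i => PySem.List.pyGetD s i ' ') from rfl,
        ← List.map_map,
        show (PySem.List.pyRange 0 (s.length : Int) 1)
          = PySem.List.pyRange 0 (PySem.List.len s) 1 from rfl,
        PySem.List.map_pyGetD_pyRange_zero]
    simp
  · intro acc i _
    simp only [pvRankWeight, pvWeight]
    split_ifs <;> omega

-- ===== VERDICT (by name: the statement is the Claim_ definition above) =====
theorem minKeyboardClick_spec : Claim_equal_minKeyboardClick := by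
  intro string _
  unfold Spec_minKeyboardClick
  show minKeyboardClick string = minKeyboardClick_alt string
  simp only [minKeyboardClick, minKeyboardClick_alt, PySem.Dict.keys_counter,
    PySem.Dict.items_counter]
  have hnd : (PySem.Set.ofList string.toList).Nodup := PySem.Set.nodup_ofList string.toList
  have hsub : ∀ x ∈ string.toList, x ∈ PySem.Set.ofList string.toList :=
    fun x hx => (PySem.Set.mem_ofList string.toList x).mpr hx
  rw [portA_eq_sum, group_sum (pvRankWeight (PySem.Set.ofList string.toList))
        string.toList (PySem.Set.ofList string.toList) hnd hsub,
      PySem.List.foldl_add]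
  simp only [zero_add]
  refine congrArg List.sum (List.ext_getElem (by simp [PySem.List.length_enumerate]) ?_).symm
  intro i h1 h2
  have hi : i < (PySem.Set.ofList string.toList).length := by
    simpa [PySem.List.length_enumerate] using h1
  simp only [List.getElem_map, PySem.List.getElem_enumerate]
  rw [pvRankWeight, index?_getElem_of_nodup _ hnd i hi]
  simp [mul_comm]
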